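-- pv_equiv track=rewrite | github.com/tmu-nlp/100knock2023 | yurikimura/chapter09/knock80.py | make_word2id_dictionary
-- ===== SOURCE A (Python) =====
-- from collections import defaultdict
-- import string
--
-- def make_word2id_dictionary(text_list):
--     # 単語の頻度集計
--     d = defaultdict(int)
--     table = str.maketrans(string.punctuation, ' '*len(string.punctuation))  # 記号をスペースに置換するテーブル
--     for text in text_list:
--         for word in text.translate(table).split():
--             d[word] += 1
--     d = sorted(d.items(), key=lambda x:x[1], reverse=True)
--
--     # 頻度から単語ID辞書の作成
--     word2id = {word: i + 1 for i, (word, cnt) in enumerate(d) if cnt > 1}  # 出現頻度が2回以上の単語を登録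
--     return word2id
-- ===== SOURCE B (Python) =====
-- from collections import defaultdict
-- import string
--
-- def make_word2id_dictionary(text_list):
--     # word frequency count (same tokenization as before)
--     d = defaultdict(int)
--     table = str.maketrans(string.punctuation, ' ' * len(string.punctuation))
--     for text in text_list:
--         for word in text.translate(table).split():
--             d[word] += 1
--     # bucket words (in first-occurrence order) by their count, keeping counts > 1
--     buckets = defaultdict(list)
--     for word, cnt in d.items():
--         if cnt > 1:
--             buckets[cnt].append(word)
--     # walk the distinct counts in descending order, assigning sequential ids
--     word2id = {}
--     next_id = 1
--     for cnt in sorted(buckets, reverse=True):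
--         for word in buckets[cnt]:
--             word2id[word] = next_id
--             next_id += 1
--     return word2id
-- ===== Notes on version B (the rewrite author's own statement) =====
-- stated objective: alternative
-- what changed: Replaces the full stable sort of all counted words by bucketing the count>1 words per count (in first-occurrence order) and walking the distinct counts in descending order, counting-sort style, assigning sequential ids.
import Mathlib
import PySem

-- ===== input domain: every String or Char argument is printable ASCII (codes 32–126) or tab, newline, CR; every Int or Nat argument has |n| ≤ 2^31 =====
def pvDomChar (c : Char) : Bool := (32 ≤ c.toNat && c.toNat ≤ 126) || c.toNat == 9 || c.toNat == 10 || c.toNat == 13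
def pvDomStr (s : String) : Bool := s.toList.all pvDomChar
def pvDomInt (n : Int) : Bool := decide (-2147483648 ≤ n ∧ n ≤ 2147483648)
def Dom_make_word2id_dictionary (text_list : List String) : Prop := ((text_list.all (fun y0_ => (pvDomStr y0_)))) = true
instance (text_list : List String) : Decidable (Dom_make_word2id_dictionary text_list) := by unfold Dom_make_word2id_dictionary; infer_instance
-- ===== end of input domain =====

-- B replaces the full stable sort of all counted words by bucketing the count>1 words per
-- count and walking the distinct counts in descending order (counting-sort style); same result.

-- string.punctuation
def pvPunct : List Char := "!\"#$%&'()*+,-./:;<=>?@[\\]^_`{|}~".toList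

-- text.translate(table) with table mapping every punctuation char to a space
def pvTranslate (s : String) : String :=
  String.ofList (s.toList.map (fun c => if c ∈ pvPunct then ' ' else c))

-- the word-frequency loop shared verbatim by A and B ('d = defaultdict(int); … d[word] += 1')
def pvCountWords (text_list : List String) : PySem.Dict String Int :=
  text_list.foldl
    (fun d text => (PySem.Str.split₀ (pvTranslate text)).foldl (fun d w => d.modify w 0 (· + 1)) d)
    PySem.Dict.empty

-- ===== PORT A =====
def make_word2id_dictionary (text_list : List String) : List (String × Int) :=
  let d := pvCountWords text_list
  let ds := PySem.List.sorted d.items (fun x => x.2) true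
  ((PySem.List.enumerate ds 0).foldl
      (fun w2 q => if q.2.2 > 1 then w2.insert q.2.1 (q.1 + 1) else w2)
      (PySem.Dict.empty : PySem.Dict String Int)).items

-- ===== PORT B =====
def make_word2id_dictionary_alt (text_list : List String) : List (String × Int) :=
  let d := pvCountWords text_list
  let buckets := d.items.foldl
      (fun b p => if p.2 > 1 then b.modify p.2 [] (· ++ [p.1]) else b)
      (PySem.Dict.empty : PySem.Dict Int (List String))
  let st := (PySem.List.sorted buckets.keys (fun c => c) true).foldl
      (fun s c => (buckets.getD c []).foldl (fun s w => (s.1.insert w s.2, s.2 + 1)) s)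
      ((PySem.Dict.empty : PySem.Dict String Int), (1 : Int))
  st.1.items

-- ===== PRECONDITION & SPEC =====
def Spec_make_word2id_dictionary (text_list : List String) (out : List (String × Int)) : Prop := out = make_word2id_dictionary_alt text_list
instance (text_list : List String) (out : List (String × Int)) : Decidable (Spec_make_word2id_dictionary text_list out) := by unfold Spec_make_word2id_dictionary; infer_instance

-- ===== CLAIM (what is proved, stated in full; the proofs are below) =====
def Claim_equal_make_word2id_dictionary : Prop := ∀ (text_list : List String), Dom_make_word2id_dictionary text_list → Spec_make_word2id_dictionary text_list (make_word2id_dictionary text_list)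

-- ===== LEMMAS AND PROOFS =====

-- (w, n), (w', n+1), … : the sequential-id list both ports produce
def pvAssign : List String → Int → List (String × Int)
  | [], _ => []
  | w :: ws, n => (w, n) :: pvAssign ws (n + 1)

lemma pv_enum_map_assign (l : List (String × Int)) :
    ∀ n : Int, (PySem.List.enumerate l n).map (fun q => (q.2.1, q.1 + 1))
      = pvAssign (l.map (fun p => p.1)) (n + 1) := by
  induction l with
  | nil => intro n; simp [PySem.List.enumerate_nil, pvAssign]
  | cons p t ih => intro n; simp [PySem.List.enumerate_cons, pvAssign, ih (n + 1)]

lemma pv_foldl_noop (l : List (String × Int)) :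
    ∀ (n : Int) (d : PySem.Dict String Int), (∀ p ∈ l, ¬ (1 < p.2)) →
    (PySem.List.enumerate l n).foldl
      (fun w2 q => if q.2.2 > 1 then w2.insert q.2.1 (q.1 + 1) else w2) d = d := by
  induction l with
  | nil => intro n d _; simp [PySem.List.enumerate_nil]
  | cons p t ih =>
    intro n d h
    have hp := h p (by simp)
    simp only [PySem.List.enumerate_cons, List.foldl_cons, gt_iff_lt, if_neg hp]
    exact ih (n + 1) d (fun q hq => h q (by simp [hq]))

lemma pv_dropWhile_fail (l : List (String × Int))
    (h : l.Pairwise (fun a b => b.2 ≤ a.2)) :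
    ∀ p ∈ l.dropWhile (fun p => decide (1 < p.2)), ¬ (1 < p.2) := by
  induction l with
  | nil => simp
  | cons x t ih =>
    by_cases hx : 1 < x.2
    · simpa [List.dropWhile_cons, hx] using ih h.tail
    · intro p hp
      rw [List.dropWhile_cons, if_neg (by simp [hx])] at hp
      rcases List.mem_cons.1 hp with rfl | hpt
      · exact hx
      · have := (List.pairwise_cons.1 h).1 p hpt
        omega

-- insertBy passes over a block it does not go before
lemma pv_insertBy_skip {α : Type} (before : α → α → Bool) (x : α) (pre suf : List α)
    (h : ∀ y ∈ pre, before x y = false) :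
    PySem.List.insertBy before x (pre ++ suf) = pre ++ PySem.List.insertBy before x suf := by
  induction pre with
  | nil => simp
  | cons y t ih =>
    have hy := h y (by simp)
    simp only [List.cons_append, PySem.List.insertBy, hy, Bool.false_eq_true]
    simp [ih (fun z hz => h z (by simp [hz]))]

lemma pv_insertBy_front {α : Type} (before : α → α → Bool) (x : α) (suf : List α)
    (h : ∀ y ∈ suf, before x y = true) :
    PySem.List.insertBy before x suf = x :: suf := by
  cases suf with
  | nil => simp [PySem.List.insertBy]
  | cons y t => simp [PySem.List.insertBy, h y (by simp)]

-- inserting x into the bucket decomposition appends it to its own bucket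
lemma pv_insertBy_buckets (cs : List Int) (x : String × Int) (l : List (String × Int))
    (hcs : cs.Pairwise (fun a b => b < a)) (hx : x.2 ∈ cs) :
    PySem.List.insertBy (fun a b => decide (b.2 < a.2)) x
      (cs.flatMap (fun c => l.filter (fun p => p.2 == c)))
    = cs.flatMap (fun c => (l ++ [x]).filter (fun p => p.2 == c)) := by
  induction cs with
  | nil => simp at hx
  | cons c cs' ih =>
    have hhead : ∀ c' ∈ cs', c' < c := (List.pairwise_cons.1 hcs).1
    by_cases hxc : x.2 = c
    · -- x belongs to the first bucket: skip it, then x goes before everything after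
      have hskip : ∀ y ∈ l.filter (fun p => p.2 == c), (fun a b => decide (b.2 < a.2)) x y = false := by
        intro y hy
        have : y.2 = c := by simpa using (List.of_mem_filter hy)
        simp [this, hxc]
      have hfront : ∀ y ∈ cs'.flatMap (fun c => l.filter (fun p => p.2 == c)),
          (fun a b => decide (b.2 < a.2)) x y = true := by
        intro y hy
        rcases List.mem_flatMap.1 hy with ⟨c', hc', hyc'⟩
        have : y.2 = c' := by simpa using (List.of_mem_filter hyc')
        simp [this, hxc]
        exact hhead c' hc'
      rw [List.flatMap_cons, pv_insertBy_skip _ _ _ _ hskip, pv_insertBy_front _ _ _ hfront]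
      rw [List.flatMap_cons]
      have h1 : (l ++ [x]).filter (fun p => p.2 == c) = l.filter (fun p => p.2 == c) ++ [x] := by
        simp [List.filter_append, hxc]
      have h2 : cs'.flatMap (fun c => (l ++ [x]).filter (fun p => p.2 == c))
          = cs'.flatMap (fun c => l.filter (fun p => p.2 == c)) := by
        apply List.flatMap_congr
        intro c' hc'
        have hlt : c' < c := hhead c' hc'
        simp [List.filter_append]
        intro h'
        omega
      rw [h1, h2]
      simp
    · -- x belongs to a later bucket
      have hx' : x.2 ∈ cs' := (List.mem_cons.1 hx).resolve_left hxc
      have hskip : ∀ y ∈ l.filter (fun p => p.2 == c), (fun a b => decide (b.2 < a.2)) x y = false := by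
        intro y hy
        have hyc : y.2 = c := by simpa using (List.of_mem_filter hy)
        have : x.2 < c := hhead _ hx'
        simp [hyc]; omega
      rw [List.flatMap_cons, pv_insertBy_skip _ _ _ _ hskip, ih hcs.tail hx']
      rw [List.flatMap_cons]
      have h1 : (l ++ [x]).filter (fun p => p.2 == c) = l.filter (fun p => p.2 == c) := by
        simp [List.filter_append]
        intro h; exact absurd h hxc
      rw [h1]

-- stability: the reverse stable sort by count is the concatenation of the original-order
-- buckets taken in strictly descending count order
lemma pv_sorted_buckets (l : List (String × Int)) (cs : List Int)
    (hcs : cs.Pairwise (fun a b => b < a)) (hmem : ∀ p ∈ l, p.2 ∈ cs) :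
    PySem.List.sorted l (fun x => x.2) true
      = cs.flatMap (fun c => l.filter (fun p => p.2 == c)) := by
  induction l using List.reverseRecOn with
  | nil =>
    rw [(PySem.List.sorted_eq_nil_iff ([] : List (String × Int)) (fun x => x.2) true).2 rfl]
    simp
  | append_singleton t x ih =>
    rw [PySem.List.sorted_rev_eq_foldl_insertBy, List.foldl_append, List.foldl_cons, List.foldl_nil,
        ← PySem.List.sorted_rev_eq_foldl_insertBy,
        ih (fun p hp => hmem p (by simp [hp]))]
    exact pv_insertBy_buckets cs x t hcs (hmem x (by simp))

lemma pv_flatMap_if (cs : List Int) (p : Int → Bool) (g : Int → List (String × Int)) :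
    cs.flatMap (fun c => if p c then g c else []) = (cs.filter p).flatMap g := by
  induction cs with
  | nil => simp
  | cons c t ih => by_cases h : p c <;> simp [h, ih]

lemma pv_foldl_flatMap {α β σ : Type} (cs : List α) (g : α → List β) (f : σ → β → σ) (init : σ) :
    cs.foldl (fun s c => (g c).foldl f s) init = (cs.flatMap g).foldl f init := by
  induction cs generalizing init with
  | nil => simp
  | cons c t ih => simp [List.foldl_append, ih]

lemma pv_foldl_insert_seq (ws : List String) :
    ∀ (d : PySem.Dict String Int) (n : Int), (∀ w ∈ ws, d.contains w = false) → ws.Nodup →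
    (ws.foldl (fun s w => (s.1.insert w s.2, s.2 + 1))
        ((d, n) : PySem.Dict String Int × Int)).1.items = d.items ++ pvAssign ws n := by
  induction ws with
  | nil => intro d n _ _; simp [pvAssign]
  | cons w t ih =>
    intro d n hfresh hnd
    have hwf : d.contains w = false := hfresh w (by simp)
    have step : ∀ w' ∈ t, (d.insert w n).contains w' = false := by
      intro w' hw'
      rw [PySem.Dict.contains_insert]
      have : w' ≠ w := fun h => (List.nodup_cons.1 hnd).1 (h ▸ hw')
      simp [this, hfresh w' (by simp [hw'])]
    simp only [List.foldl_cons]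
    rw [ih (d.insert w n) (n + 1) step (List.nodup_cons.1 hnd).2,
        PySem.Dict.items_insert_of_not_contains _ _ hwf]
    simp [pvAssign]

-- the keys of the counting dict stay Nodup
lemma pv_nodup_keys_count (ts : List String) :
    ∀ d : PySem.Dict String Int, d.keys.Nodup →
    (ts.foldl (fun d text => (PySem.Str.split₀ (pvTranslate text)).foldl
        (fun d w => d.modify w 0 (· + 1)) d) d).keys.Nodup := by
  induction ts with
  | nil => intro d h; simpa
  | cons t ts ih =>
    intro d h
    simp only [List.foldl_cons]
    exact ih _ (PySem.Dict.nodup_keys_foldl_modify_key _ (fun w => w) 0 (fun _ _ v => v + 1) d h)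

-- nodup + weakly descending ⇒ strictly descending
lemma pv_strict_desc (l : List Int) (hnd : l.Nodup) (h : l.Pairwise (fun a b => b ≤ a)) :
    l.Pairwise (fun a b => b < a) := by
  have := h.and hnd
  exact this.imp (fun {a b} hab => lt_of_le_of_ne hab.1 (Ne.symm hab.2))

-- the A-side value: sequential ids over the kept prefix of the sorted list
lemma pv_a_side (l : List (String × Int)) (hnd : (l.map (fun p => p.1)).Nodup) :
    ((PySem.List.enumerate (PySem.List.sorted l (fun x => x.2) true) 0).foldl
        (fun w2 q => if q.2.2 > 1 then w2.insert q.2.1 (q.1 + 1) else w2)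
        (PySem.Dict.empty : PySem.Dict String Int)).items
    = pvAssign ((((PySem.List.sorted l (fun x => x.2) true).filter
        (fun p => decide (1 < p.2))).map (fun p => p.1))) 1 := by
  set ds := PySem.List.sorted l (fun x => x.2) true with hds
  have hpw : ds.Pairwise (fun a b => b.2 ≤ a.2) := PySem.List.sorted_pairwise_rev l (fun x => x.2)
  have hndds : (ds.map (fun p => p.1)).Nodup :=
    (((PySem.List.sorted_perm l (fun x => x.2) true).map (fun p => p.1)).nodup_iff).2 hnd
  set keep := ds.takeWhile (fun p => decide (1 < p.2)) with hkeepdef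
  set rest := ds.dropWhile (fun p => decide (1 < p.2)) with hrestdef
  have hsplit : keep ++ rest = ds := List.takeWhile_append_dropWhile
  have hkeepall : ∀ p ∈ keep, decide (1 < p.2) = true := fun p hp => List.mem_takeWhile_imp (p := fun q : String × Int => decide (1 < q.2)) hp
  have hrestall : ∀ p ∈ rest, ¬ (1 < p.2) := pv_dropWhile_fail ds hpw
  have hfilter : ds.filter (fun p => decide (1 < p.2)) = keep := by
    conv_lhs => rw [← hsplit]
    rw [List.filter_append, List.filter_eq_self.2 hkeepall,
        List.filter_eq_nil_iff.2 (by intro a ha; simpa using hrestall a ha), List.append_nil]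
  have hndkeep : (keep.map (fun p => p.1)).Nodup :=
    List.Sublist.nodup
      (List.Sublist.map (fun p => p.1)
        (List.takeWhile_sublist (p := fun q : String × Int => decide (1 < q.2)) (l := ds)))
      hndds
  conv_lhs => rw [← hsplit, PySem.List.enumerate_append, List.foldl_append]
  have hcongr : ∀ (acc : PySem.Dict String Int), ∀ q ∈ PySem.List.enumerate keep 0,
      (fun w2 q => if q.2.2 > 1 then w2.insert q.2.1 (q.1 + 1) else w2) acc q
      = (fun w2 q => w2.insert q.2.1 (q.1 + 1)) acc q := by
    intro acc q hq
    rcases (PySem.List.mem_enumerate_iff keep 0 q).1 hq with ⟨k, hk, rfl⟩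
    have : decide (1 < keep[k].2) = true := hkeepall _ (List.getElem_mem hk)
    simp only [gt_iff_lt]
    rw [if_pos (by simpa using this)]
  rw [PySem.List.foldl_congr_mem _ _ _ _ hcongr]
  have hfresh : ∀ q ∈ PySem.List.enumerate keep 0,
      (PySem.Dict.empty : PySem.Dict String Int).contains q.2.1 = false := by
    intro q _; exact PySem.Dict.contains_empty _
  have hndk : ((PySem.List.enumerate keep 0).map (fun q => q.2.1)).Nodup := by
    have : (PySem.List.enumerate keep 0).map (fun q => q.2.1)
        = ((PySem.List.enumerate keep 0).map (fun q => q.2)).map (fun p => p.1) := by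
      rw [List.map_map]; rfl
    rw [this, PySem.List.map_snd_enumerate]
    exact hndkeep
  rw [pv_foldl_noop rest _ _ hrestall,
      PySem.Dict.items_foldl_insert_fresh (PySem.List.enumerate keep 0)
        (fun q => q.2.1) (fun q => q.1 + 1) _ hfresh hndk]
  rw [show (PySem.Dict.empty : PySem.Dict String Int).items = [] from rfl, List.nil_append]
  rw [hfilter]
  simpa using pv_enum_map_assign keep 0

-- the core equality, for any items list with distinct words
lemma pv_core (l : List (String × Int)) (hnd : (l.map (fun p => p.1)).Nodup) :
    ((PySem.List.enumerate (PySem.List.sorted l (fun x => x.2) true) 0).foldl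
        (fun w2 q => if q.2.2 > 1 then w2.insert q.2.1 (q.1 + 1) else w2)
        (PySem.Dict.empty : PySem.Dict String Int)).items
    = (let buckets := l.foldl
          (fun b p => if p.2 > 1 then b.modify p.2 [] (· ++ [p.1]) else b)
          (PySem.Dict.empty : PySem.Dict Int (List String))
       ((PySem.List.sorted buckets.keys (fun c => c) true).foldl
          (fun s c => (buckets.getD c []).foldl (fun s w => (s.1.insert w s.2, s.2 + 1)) s)
          ((PySem.Dict.empty : PySem.Dict String Int), (1 : Int))).1.items) := by
  show ((PySem.List.enumerate (PySem.List.sorted l (fun x => x.2) true) 0).foldl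
        (fun w2 q => if q.2.2 > 1 then w2.insert q.2.1 (q.1 + 1) else w2)
        (PySem.Dict.empty : PySem.Dict String Int)).items
    = ((PySem.List.sorted (l.foldl
          (fun b p => if p.2 > 1 then b.modify p.2 [] (· ++ [p.1]) else b)
          (PySem.Dict.empty : PySem.Dict Int (List String))).keys (fun c => c) true).foldl
        (fun s c => ((l.foldl
          (fun b p => if p.2 > 1 then b.modify p.2 [] (· ++ [p.1]) else b)
          (PySem.Dict.empty : PySem.Dict Int (List String))).getD c []).foldl
            (fun s w => (s.1.insert w s.2, s.2 + 1)) s)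
        ((PySem.Dict.empty : PySem.Dict String Int), (1 : Int))).1.items
  set ds := PySem.List.sorted l (fun x => x.2) true with hdsdef
  set F := l.filter (fun p => decide (1 < p.2)) with hFdef
  set buckets := l.foldl
      (fun b p => if p.2 > 1 then b.modify p.2 [] (· ++ [p.1]) else b)
      (PySem.Dict.empty : PySem.Dict Int (List String)) with hbdef
  -- buckets as a fold over F, in swapped-pair standard form
  have hbF : buckets = (F.map (fun p => (p.2, p.1))).foldl
      (fun d q => d.modify q.1 [] (· ++ [q.2])) PySem.Dict.empty := by
    rw [List.foldl_map]
    exact PySem.List.foldl_ite_eq_foldl_filter (fun p => p.2 > 1)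
      (fun b p => b.modify p.2 [] (· ++ [p.1])) l PySem.Dict.empty
  have hkeys : buckets.keys = PySem.Set.ofList (F.map (fun p => p.2)) := by
    rw [hbF]
    have h1 := PySem.Dict.keys_foldl_modify_key (F.map (fun p => (p.2, p.1)))
      (fun q => q.1) [] (fun _ q v => v ++ [q.2]) PySem.Dict.empty
    rw [PySem.Dict.keys_empty, PySem.Set.update_nil_left, List.map_map] at h1
    exact h1
  have hgetD : ∀ c : Int, buckets.getD c []
      = (F.filter (fun p => p.2 == c)).map (fun p => p.1) := by
    intro c
    have h1 := PySem.Dict.getD_foldl_modify_append (F.map (fun p => (p.2, p.1)))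
      PySem.Dict.empty c
    rw [PySem.Dict.getD_empty, List.nil_append, List.filter_map, List.map_map] at h1
    rw [hbF]
    exact h1
  -- distinct counts, descending
  set descCounts := PySem.List.sorted buckets.keys (fun c => c) true with hdcdef
  have hdc_nodup : descCounts.Nodup := by
    rw [hdcdef]
    exact ((PySem.List.sorted_perm buckets.keys (fun c => c) true).nodup_iff).2
      (by rw [hkeys]; exact PySem.Set.nodup_ofList _)
  have hdc_strict : descCounts.Pairwise (fun a b => b < a) :=
    pv_strict_desc _ hdc_nodup (PySem.List.sorted_pairwise_rev buckets.keys (fun c => c))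
  have hdc_mem : ∀ c : Int, c ∈ descCounts ↔ c ∈ F.map (fun p => p.2) := by
    intro c
    rw [hdcdef, PySem.List.mem_sorted, hkeys, PySem.Set.mem_ofList]
  have hdc_gt1 : ∀ c ∈ descCounts, 1 < c := by
    intro c hc
    rcases List.mem_map.1 ((hdc_mem c).1 hc) with ⟨p, hp, rfl⟩
    have := List.of_mem_filter hp
    simpa using this
  -- all counts, descending
  set allCounts := PySem.List.sorted (PySem.Set.ofList (l.map (fun p => p.2))) (fun c => c) true
    with hacdef
  have hac_nodup : allCounts.Nodup :=
    ((PySem.List.sorted_perm _ (fun c => c) true).nodup_iff).2 (PySem.Set.nodup_ofList _)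
  have hac_strict : allCounts.Pairwise (fun a b => b < a) :=
    pv_strict_desc _ hac_nodup (PySem.List.sorted_pairwise_rev _ (fun c => c))
  have hac_mem : ∀ c : Int, c ∈ allCounts ↔ c ∈ l.map (fun p => p.2) := by
    intro c; rw [hacdef, PySem.List.mem_sorted, PySem.Set.mem_ofList]
  have hds : ds = allCounts.flatMap (fun c => l.filter (fun p => p.2 == c)) :=
    pv_sorted_buckets l allCounts hac_strict
      (fun p hp => (hac_mem p.2).2 (List.mem_map.2 ⟨p, hp, rfl⟩))
  set csPlus := allCounts.filter (fun c => decide (1 < c)) with hcpdef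
  have hcp_strict : csPlus.Pairwise (fun a b => b < a) :=
    List.Pairwise.sublist (List.filter_sublist) hac_strict
  have hdc_eq : descCounts = csPlus := by
    apply List.Perm.eq_of_pairwise (le := fun a b => b < a)
      (by intro a b _ _ h1 h2; omega) hdc_strict hcp_strict
    rw [List.perm_ext_iff_of_nodup hdc_nodup ((List.filter_sublist).nodup hac_nodup)]
    intro c
    rw [hdc_mem c, List.mem_filter, hac_mem c]
    constructor
    · intro h
      rcases List.mem_map.1 h with ⟨p, hp, rfl⟩
      have hpl := List.mem_of_mem_filter hp
      have hpb := List.of_mem_filter hp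
      exact ⟨List.mem_map.2 ⟨p, hpl, rfl⟩, by simpa using hpb⟩
    · rintro ⟨hcl, hc1⟩
      rcases List.mem_map.1 hcl with ⟨p, hp, rfl⟩
      exact List.mem_map.2 ⟨p, List.mem_filter.2 ⟨hp, by simpa using hc1⟩, rfl⟩
  -- the kept entries of the sorted list, bucket by bucket
  have hfilter_ds : ds.filter (fun p => decide (1 < p.2))
      = csPlus.flatMap (fun c => l.filter (fun p => p.2 == c)) := by
    rw [hds, List.filter_flatMap]
    have hinner : ∀ c ∈ allCounts,
        (l.filter (fun p => p.2 == c)).filter (fun p => decide (1 < p.2))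
        = if decide (1 < c) then l.filter (fun p => p.2 == c) else [] := by
      intro c _
      rw [List.filter_filter]
      by_cases hc : 1 < c
      · rw [if_pos (by simpa using hc)]
        apply List.filter_congr
        intro a _
        by_cases ha : a.2 = c
        · simp [ha]; omega
        · simp [ha]
      · rw [if_neg (by simpa using hc)]
        rw [List.filter_eq_nil_iff]
        intro a _
        by_cases ha : a.2 = c
        · simp [ha]; omega
        · simp [ha]
    rw [List.flatMap_congr hinner]
    exact pv_flatMap_if allCounts (fun c => decide (1 < c)) (fun c => l.filter (fun p => p.2 == c))
  have hndds : (ds.map (fun p => p.1)).Nodup :=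
    (((PySem.List.sorted_perm l (fun x => x.2) true).map (fun p => p.1)).nodup_iff).2 hnd
  -- B's flattened word list is the kept word list
  have hws : descCounts.flatMap (fun c => buckets.getD c [])
      = (ds.filter (fun p => decide (1 < p.2))).map (fun p => p.1) := by
    calc descCounts.flatMap (fun c => buckets.getD c [])
        = descCounts.flatMap (fun c => (F.filter (fun p => p.2 == c)).map (fun p => p.1)) :=
          List.flatMap_congr (fun c _ => hgetD c)
      _ = descCounts.flatMap (fun c => (l.filter (fun p => p.2 == c)).map (fun p => p.1)) := by
          apply List.flatMap_congr
          intro c hc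
          have hc1 : 1 < c := hdc_gt1 c hc
          congr 1
          rw [hFdef, List.filter_filter]
          apply List.filter_congr
          intro a _
          by_cases ha : a.2 = c
          · simp [ha]; omega
          · simp [ha]
      _ = csPlus.flatMap (fun c => (l.filter (fun p => p.2 == c)).map (fun p => p.1)) := by
          rw [hdc_eq]
      _ = (csPlus.flatMap (fun c => l.filter (fun p => p.2 == c))).map (fun p => p.1) :=
          List.map_flatMap.symm
      _ = (ds.filter (fun p => decide (1 < p.2))).map (fun p => p.1) := by rw [hfilter_ds]
  have hndws : (descCounts.flatMap (fun c => buckets.getD c [])).Nodup := by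
    rw [hws]
    exact List.Sublist.nodup
      (List.Sublist.map (fun p : String × Int => p.1)
        (List.filter_sublist (p := fun q : String × Int => decide (1 < q.2)) (l := ds))) hndds
  -- flatten B's nested loop and run the sequential-id fold
  rw [pv_a_side l hnd,
      pv_foldl_flatMap descCounts (fun c => buckets.getD c [])
        (fun s w => (s.1.insert w s.2, s.2 + 1))
        ((PySem.Dict.empty : PySem.Dict String Int), (1 : Int)),
      pv_foldl_insert_seq _ PySem.Dict.empty 1
        (fun w _ => PySem.Dict.contains_empty w) hndws,
      show (PySem.Dict.empty : PySem.Dict String Int).items = [] from rfl, List.nil_append, hws]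
-- ===== VERDICT (by name: the statement is the Claim_ definition above) =====
theorem make_word2id_dictionary_spec : Claim_equal_make_word2id_dictionary := by
  intro text_list _
  unfold Spec_make_word2id_dictionary make_word2id_dictionary make_word2id_dictionary_alt
  have hnd : ((pvCountWords text_list).items.map (fun p => p.1)).Nodup :=
    pv_nodup_keys_count text_list PySem.Dict.empty (by simp)
  exact pv_core (pvCountWords text_list).items hnd
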